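-- pv_equiv track=rewrite | github.com/croweykid/ephemeraldaddy | ephemeraldaddy/analysis/human_design.py | _format_defined_centers
-- ===== SOURCE A (Python) =====
-- def _format_defined_centers(defined_centers: set[str]) -> str:
--     if not defined_centers:
--         return "None"
--     center_order = (
--         "Head",
--         "Ajna",
--         "Throat",
--         "G",
--         "Ego",
--         "Spleen",
--         "Solar Plexus",
--         "Sacral",
--         "Root",
--     )
--     ordered = [center for center in center_order if center in defined_centers]
--     ordered.extend(sorted(center for center in defined_centers if center not in center_order))
--     return ", ".join(ordered)
-- ===== SOURCE B (Python) =====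
-- def _format_defined_centers(defined_centers: set[str]) -> str:
--     if not defined_centers:
--         return "None"
--     center_order = (
--         "Head",
--         "Ajna",
--         "Throat",
--         "G",
--         "Ego",
--         "Spleen",
--         "Solar Plexus",
--         "Sacral",
--         "Root",
--     )
--     rank = {center: i for i, center in enumerate(center_order)}
--     return ", ".join(
--         sorted(defined_centers, key=lambda c: (rank.get(c, len(center_order)), c))
--     )
-- ===== Notes on version B (the rewrite author's own statement) =====
-- stated objective: simpler
-- what changed: Replaces A's two passes (a filter over center_order plus a separate sorted() over the leftovers, concatenated) by one sorted() call over the whole set with a composite key (rank-dictionary index, name); known centers order by rank, unknowns share the max rank and fall back to alphabetical, matching A exactly.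
import Mathlib
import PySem

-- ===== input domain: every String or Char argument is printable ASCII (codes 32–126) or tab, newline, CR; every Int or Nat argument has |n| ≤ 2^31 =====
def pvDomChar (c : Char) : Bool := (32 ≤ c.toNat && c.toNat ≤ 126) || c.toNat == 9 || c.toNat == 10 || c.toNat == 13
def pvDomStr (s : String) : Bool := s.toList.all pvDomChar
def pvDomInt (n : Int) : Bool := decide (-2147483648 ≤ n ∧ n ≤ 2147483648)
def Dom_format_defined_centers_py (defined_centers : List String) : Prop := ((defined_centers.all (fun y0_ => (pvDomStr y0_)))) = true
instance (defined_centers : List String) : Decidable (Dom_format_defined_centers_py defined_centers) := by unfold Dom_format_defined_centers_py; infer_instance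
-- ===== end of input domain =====

-- B replaces A's two passes (filter over center_order, then sorted() of the leftovers) by one
-- sorted() over the whole set with a composite (rank-dictionary, name) key — simpler, same cost.


-- ===== PORT A =====
def centerOrderA : List String :=
  ["Head", "Ajna", "Throat", "G", "Ego", "Spleen", "Solar Plexus", "Sacral", "Root"]

def format_defined_centers_py (defined_centers : List String) : String :=
  if defined_centers = [] then "None"
  else
    -- ordered = [center for center in center_order if center in defined_centers]
    let ordered := centerOrderA.filter (fun center => defined_centers.contains center)
    -- ordered.extend(sorted(center for center in defined_centers if center not in center_order))
    let ordered := ordered ++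
      PySem.List.sorted
        (defined_centers.filter (fun center => !centerOrderA.contains center))
        (fun center => center)
    PySem.Str.join ", " ordered

-- ===== PORT B =====
def centerOrderB : List String :=
  ["Head", "Ajna", "Throat", "G", "Ego", "Spleen", "Solar Plexus", "Sacral", "Root"]

-- rank = {center: i for i, center in enumerate(center_order)}
def rankB : PySem.Dict String Int :=
  (PySem.List.enumerate centerOrderB).foldl (fun d p => d.insert p.2 p.1) PySem.Dict.empty

def format_defined_centers_py_alt (defined_centers : List String) : String :=
  if defined_centers = [] then "None"
  else
    PySem.Str.join ", "
      (PySem.List.sorted2 defined_centers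
        (fun c => rankB.getD c (Int.ofNat centerOrderB.length))
        (fun c => c))

-- ===== PRECONDITION & SPEC =====
-- The Python parameter is a set[str]; a List with duplicate elements represents no Python input
-- (A answers by membership while B sorts the list as given), so Pre_ requires distinct elements.
def Pre_format_defined_centers_py (defined_centers : List String) : Prop :=
  defined_centers.Nodup
instance (defined_centers : List String) : Decidable (Pre_format_defined_centers_py defined_centers) := by unfold Pre_format_defined_centers_py; infer_instance

def pvWitness_format_defined_centers_py : List String := ["Root", "Foo", "Ajna"]

def Spec_format_defined_centers_py (defined_centers : List String) (out : String) : Prop := out = format_defined_centers_py_alt defined_centers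
instance (defined_centers : List String) (out : String) : Decidable (Spec_format_defined_centers_py defined_centers out) := by unfold Spec_format_defined_centers_py; infer_instance

-- ===== CLAIM (what is proved, stated in full; the proofs are below) =====
def Claim_equal_format_defined_centers_py : Prop := ∀ (defined_centers : List String), Dom_format_defined_centers_py defined_centers → Pre_format_defined_centers_py defined_centers → Spec_format_defined_centers_py defined_centers (format_defined_centers_py defined_centers)

-- ===== LEMMAS AND PROOFS =====

-- B's key, as a single lexicographically ordered value
def keyB (c : String) : Lex (Int × String) :=
  toLex (rankB.getD c 9, c)

-- sorted2 with keys (k1, k2) is sorted with the lexicographic key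
lemma sorted2_eq_sorted_lex {α : Type} (xs : List α) (k1 : α → Int) (k2 : α → String) :
    PySem.List.sorted2 xs k1 k2 = PySem.List.sorted xs (fun a => toLex (k1 a, k2 a)) := by
  unfold PySem.List.sorted2 PySem.List.sorted
  have h : (fun a b => decide (k1 a < k1 b) || (!decide (k1 b < k1 a) && decide (k2 a < k2 b)))
      = (fun a b => decide (toLex (k1 a, k2 a) < toLex (k1 b, k2 b))) := by
    funext a b
    rw [Bool.eq_iff_iff]
    simp only [Bool.or_eq_true, Bool.and_eq_true, Bool.not_eq_true',
      decide_eq_true_eq, decide_eq_false_iff_not, Prod.Lex.toLex_lt_toLex]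
    constructor
    · rintro (h1 | ⟨h1, h2⟩)
      · exact Or.inl h1
      · rcases lt_or_eq_of_le (not_lt.mp h1) with h3 | h3
        · exact Or.inl h3
        · exact Or.inr ⟨h3, h2⟩
    · rintro (h1 | ⟨h1, h2⟩)
      · exact Or.inl h1
      · exact Or.inr ⟨by simp [h1], h2⟩
  simp only [Bool.false_eq_true, if_false, h]

lemma rankB_lt_of_mem : ∀ c ∈ centerOrderB, rankB.getD c 9 < 9 := by
  decide

lemma rankB_eq_of_not_mem (c : String) (hc : c ∉ centerOrderB) :
    rankB.getD c 9 = 9 := by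
  simp only [centerOrderB, List.mem_cons, List.not_mem_nil, or_false, not_or] at hc
  obtain ⟨h1, h2, h3, h4, h5, h6, h7, h8, h9⟩ := hc
  have hr : rankB = PySem.Dict.mk [("Head", 0), ("Ajna", 1), ("Throat", 2), ("G", 3),
      ("Ego", 4), ("Spleen", 5), ("Solar Plexus", 6), ("Sacral", 7), ("Root", 8)] := by decide
  simp [hr, PySem.Dict.getD, Ne.symm h1, Ne.symm h2, Ne.symm h3,
    Ne.symm h4, Ne.symm h5, Ne.symm h6, Ne.symm h7, Ne.symm h8, Ne.symm h9, PySem.Dict.get?]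

lemma centerOrderB_pairwise : centerOrderB.Pairwise (fun a b => keyB a < keyB b) := by
  decide

lemma centerOrderA_eq : centerOrderA = centerOrderB := rfl

-- the heart: A's two-pass list is exactly Python's sort of the whole set by B's composite key
lemma sorted_key_eq (dc : List String) (hnd : dc.Nodup) :
    PySem.List.sorted dc keyB
      = centerOrderA.filter (fun c => dc.contains c)
        ++ PySem.List.sorted (dc.filter (fun c => !centerOrderA.contains c)) (fun c => c) := by
  set known := centerOrderA.filter (fun c => dc.contains c) with hknown
  set us := dc.filter (fun c => !centerOrderA.contains c) with hus
  set sus := PySem.List.sorted us (fun c => c) with hsus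
  have hmem_known : ∀ c, c ∈ known ↔ (c ∈ centerOrderB ∧ c ∈ dc) := by
    intro c
    simp [hknown, List.mem_filter, centerOrderA_eq]
  have hmem_sus : ∀ c, c ∈ sus ↔ (c ∈ dc ∧ c ∉ centerOrderB) := by
    intro c
    simp [hsus, PySem.List.mem_sorted, hus, List.mem_filter, centerOrderA_eq]
  -- permutation
  have hperm : (known ++ sus).Perm dc := by
    have h1 : known.Perm (dc.filter (fun c => centerOrderA.contains c)) := by
      rw [List.perm_ext_iff_of_nodup
        ((by decide : centerOrderA.Nodup).filter _) (hnd.filter _)]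
      intro c
      simp [List.mem_filter, centerOrderA_eq, and_comm]
    have h2 : sus.Perm us := PySem.List.sorted_perm us (fun c => c) false
    exact ((h1.append h2).trans
      (List.filter_append_perm (fun c => centerOrderA.contains c) dc))
  -- pairwise strictly increasing keys
  have hpair : (known ++ sus).Pairwise (fun a b => keyB a < keyB b) := by
    rw [List.pairwise_append]
    refine ⟨centerOrderB_pairwise.filter _, ?_, ?_⟩
    · -- inside the sorted unknowns: strings strictly increase, ranks are all 9
      have hnd_us : us.Nodup := hnd.filter _
      have hnd_sus : sus.Nodup := (PySem.List.sorted_perm us (fun c => c) false).nodup_iff.mpr hnd_us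
      have hle : sus.Pairwise (fun a b => a ≤ b) := by
        have := PySem.List.sorted_pairwise us (fun c => c)
        simpa [hsus] using this
      have hlt : sus.Pairwise (fun a b => a < b) :=
        (hle.and hnd_sus).imp (fun h => lt_of_le_of_ne h.1 h.2)
      refine hlt.imp_of_mem (fun {a b} ha hb hab => ?_)
      have ha' := (hmem_sus a).mp ha
      have hb' := (hmem_sus b).mp hb
      simp [keyB, Prod.Lex.toLex_lt_toLex, rankB_eq_of_not_mem a ha'.2,
        rankB_eq_of_not_mem b hb'.2, hab]
    · intro a ha b hb
      have ha' := (hmem_known a).mp ha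
      have hb' := (hmem_sus b).mp hb
      have h1 : rankB.getD a 9 < 9 := rankB_lt_of_mem a ha'.1
      have h2 : rankB.getD b 9 = 9 := rankB_eq_of_not_mem b hb'.2
      simp [keyB, Prod.Lex.toLex_lt_toLex]
      omega
  exact PySem.List.sorted_eq_of_perm_of_pairwise_lt dc (known ++ sus) keyB hperm hpair

-- ===== VERDICT (by name: the statement is the Claim_ definition above) =====
theorem format_defined_centers_py_spec : Claim_equal_format_defined_centers_py := by
  intro dc _hdom hpre
  unfold Spec_format_defined_centers_py format_defined_centers_py format_defined_centers_py_alt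
  by_cases hnil : dc = []
  · simp [hnil]
  · simp only [hnil, if_false]
    rw [sorted2_eq_sorted_lex]
    have : PySem.List.sorted dc (fun a => toLex (rankB.getD a (Int.ofNat centerOrderB.length), a))
        = PySem.List.sorted dc keyB := rfl
    rw [this, sorted_key_eq dc hpre]
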